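-- pv_equiv track=rewrite | github.com/deanwang-bain/ET | app.py | _history_bonus
-- ===== SOURCE A (Python) =====
-- def _history_bonus(expert, recent_history):
--     if not recent_history:
--         return 0
--     bonus = 0
--     industry_tags = set(expert.get("industryTags", []))
--     function_tags = set(expert.get("functionTags", []))
--     topic_tags = set([t.lower() for t in expert.get("topicKeywords", [])])
--     for item in recent_history:
--         tags = item.get("tags", {})
--         bonus += 2 * len(industry_tags.intersection(tags.get("industries", [])))
--         bonus += 2 * len(function_tags.intersection(tags.get("functions", [])))
--         bonus += len(topic_tags.intersection([t.lower() for t in tags.get("topics", [])]))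
--     return min(10, bonus)
-- ===== SOURCE B (Python) =====
-- def _tally(recent_history, key, lower):
--     c = {}
--     for item in recent_history:
--         vals = item.get("tags", {}).get(key, [])
--         if lower:
--             vals = [v.lower() for v in vals]
--         for t in set(vals):
--             c[t] = c.get(t, 0) + 1
--     return c
--
--
-- def _score(counter, tags):
--     return sum(counter.get(t, 0) for t in tags)
--
--
-- def _history_bonus(expert, recent_history):
--     ind = _tally(recent_history, "industries", False)
--     fn = _tally(recent_history, "functions", False)
--     top = _tally(recent_history, "topics", True)
--     bonus = 2 * _score(ind, set(expert.get("industryTags", [])))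
--     bonus += 2 * _score(fn, set(expert.get("functionTags", [])))
--     bonus += _score(top, {t.lower() for t in expert.get("topicKeywords", [])})
--     return min(10, bonus)
-- ===== Notes on version B (the rewrite author's own statement) =====
-- stated objective: alternative
-- what changed: Instead of intersecting the expert's three tag sets with each history item's tags, B tallies three frequency tables (per-item-deduplicated counters) over the whole history once and then sums each expert tag's tally, capping at 10.
import Mathlib
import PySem

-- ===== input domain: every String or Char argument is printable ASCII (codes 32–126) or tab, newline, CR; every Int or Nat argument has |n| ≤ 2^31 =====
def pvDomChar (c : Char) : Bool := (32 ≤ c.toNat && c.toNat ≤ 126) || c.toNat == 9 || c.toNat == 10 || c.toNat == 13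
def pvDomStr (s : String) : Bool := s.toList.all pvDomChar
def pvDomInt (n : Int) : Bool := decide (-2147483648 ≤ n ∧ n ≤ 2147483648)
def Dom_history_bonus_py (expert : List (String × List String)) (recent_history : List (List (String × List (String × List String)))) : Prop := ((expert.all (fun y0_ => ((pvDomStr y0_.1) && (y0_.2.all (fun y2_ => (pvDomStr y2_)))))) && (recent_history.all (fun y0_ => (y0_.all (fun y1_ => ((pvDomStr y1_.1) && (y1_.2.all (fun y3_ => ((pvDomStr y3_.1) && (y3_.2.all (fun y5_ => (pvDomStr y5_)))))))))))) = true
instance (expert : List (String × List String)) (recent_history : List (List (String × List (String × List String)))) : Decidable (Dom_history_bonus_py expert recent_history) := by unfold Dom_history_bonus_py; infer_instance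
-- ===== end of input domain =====

-- B replaces A's per-item set intersections by three frequency tables tallied over the
-- history once, then scores the expert's own tag sets against them (objective: alternative
-- decomposition, same asymptotic cost).

-- ===== PORT A =====
def history_bonus_py (expert : List (String × List String)) (recent_history : List (List (String × List (String × List String)))) : Int :=
  if recent_history = [] then 0
  else
    let industry_tags : PySem.Set String := PySem.Set.ofList (PySem.Dict.getD ⟨expert⟩ "industryTags" [])
    let function_tags : PySem.Set String := PySem.Set.ofList (PySem.Dict.getD ⟨expert⟩ "functionTags" [])
    let topic_tags : PySem.Set String := PySem.Set.ofList ((PySem.Dict.getD ⟨expert⟩ "topicKeywords" []).map PySem.Str.lower)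
    let bonus : Int := recent_history.foldl (fun bonus item =>
      let tags : List (String × List String) := PySem.Dict.getD ⟨item⟩ "tags" []
      let bonus := bonus + 2 * PySem.Set.len (PySem.Set.inter industry_tags (PySem.Dict.getD ⟨tags⟩ "industries" []))
      let bonus := bonus + 2 * PySem.Set.len (PySem.Set.inter function_tags (PySem.Dict.getD ⟨tags⟩ "functions" []))
      bonus + PySem.Set.len (PySem.Set.inter topic_tags ((PySem.Dict.getD ⟨tags⟩ "topics" []).map PySem.Str.lower))) 0
    min 10 bonus

-- ===== PORT B =====
-- B helper: one counter over the history for one tag key ('_tally' in Source B)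
def pvTally (recent_history : List (List (String × List (String × List String)))) (key : String) (lower : Bool) : PySem.Dict String Int :=
  recent_history.foldl (fun c item =>
    let vals0 : List String := PySem.Dict.getD ⟨(PySem.Dict.getD ⟨item⟩ "tags" [] : List (String × List String))⟩ key []
    let vals : List String := if lower then vals0.map PySem.Str.lower else vals0
    (PySem.Set.ofList vals).foldl (fun c t => PySem.Dict.modify c t 0 (· + 1)) c) PySem.Dict.empty

-- B helper: '_score' in Source B
def pvScore (c : PySem.Dict String Int) (tags : PySem.Set String) : Int :=
  (tags.map (fun t => PySem.Dict.getD c t 0)).sum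

def history_bonus_py_alt (expert : List (String × List String)) (recent_history : List (List (String × List (String × List String)))) : Int :=
  let ind := pvTally recent_history "industries" false
  let fn := pvTally recent_history "functions" false
  let top := pvTally recent_history "topics" true
  let bonus : Int :=
    2 * pvScore ind (PySem.Set.ofList (PySem.Dict.getD ⟨expert⟩ "industryTags" []))
    + 2 * pvScore fn (PySem.Set.ofList (PySem.Dict.getD ⟨expert⟩ "functionTags" []))
    + pvScore top (PySem.Set.ofList ((PySem.Dict.getD ⟨expert⟩ "topicKeywords" []).map PySem.Str.lower))
  min 10 bonus

-- ===== PRECONDITION & SPEC =====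
def Spec_history_bonus_py (expert : List (String × List String)) (recent_history : List (List (String × List (String × List String)))) (out : Int) : Prop := out = history_bonus_py_alt expert recent_history
instance (expert : List (String × List String)) (recent_history : List (List (String × List (String × List String)))) (out : Int) : Decidable (Spec_history_bonus_py expert recent_history out) := by unfold Spec_history_bonus_py; infer_instance

-- ===== CLAIM (what is proved, stated in full; the proofs are below) =====
def Claim_equal_history_bonus_py : Prop := ∀ (expert : List (String × List String)) (recent_history : List (List (String × List (String × List String)))), Dom_history_bonus_py expert recent_history → Spec_history_bonus_py expert recent_history (history_bonus_py expert recent_history)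

-- ===== LEMMAS AND PROOFS =====

-- intersecting a Set with a list counts the Set's elements that occur in the list
lemma len_inter_eq_countP (E L : List String) :
    PySem.Set.len (PySem.Set.inter E L) = (E.countP (fun t => decide (t ∈ L)) : Int) := by
  simp [PySem.Set.inter, PySem.Set.len, List.countP_eq_length_filter, PySem.Set.contains]

-- the tally loop is a counter over the concatenation of the per-item deduplicated tag lists
lemma getD_tally (f : α → List String) (h : List α) (t : String) :
    PySem.Dict.getD (h.foldl (fun c item => (PySem.Set.ofList (f item)).foldl
        (fun c t => PySem.Dict.modify c t 0 (· + 1)) c) PySem.Dict.empty) t 0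
      = ((h.flatMap (fun item => PySem.Set.ofList (f item))).count t : Int) := by
  rw [← List.foldl_flatMap, PySem.Dict.getD_foldl_modify_add_one]
  simp [PySem.Dict.empty, PySem.Dict.getD, PySem.Dict.get?]

-- exchanging the two summations
lemma sum_swap_int (g : String → α → Int) (E : List String) (h : List α) :
    (E.map (fun t => (h.map (fun item => g t item)).sum)).sum
      = (h.map (fun item => (E.map (fun t => g t item)).sum)).sum := by
  induction h with
  | nil => simp
  | cons x xs ih =>
    simp only [List.map_cons, List.sum_cons]
    rw [← ih, ← PySem.List.sum_map_add_int]

-- a deduplicated list counts any element 0 or 1 times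
lemma count_ofList_indicator (l : List String) (t : String) :
    ((PySem.Set.ofList l).count t : Int) = if decide (t ∈ l) = true then 1 else 0 := by
  by_cases hm : t ∈ l
  · simp [hm]
  · simp [hm, List.count_eq_zero_of_not_mem (fun hc => hm ((PySem.Set.mem_ofList _ _).1 hc))]

-- scoring a tag list against the tally = summing per-item intersection sizes (sum swap)
lemma score_tally (f : α → List String) (E : List String) (h : List α) :
    (E.map (fun t => PySem.Dict.getD (h.foldl (fun c item => (PySem.Set.ofList (f item)).foldl
        (fun c t => PySem.Dict.modify c t 0 (· + 1)) c) PySem.Dict.empty) t 0)).sum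
      = (h.map (fun item => (E.countP (fun t => decide (t ∈ f item)) : Int))).sum := by
  have hrw : ∀ t : String,
      PySem.Dict.getD (h.foldl (fun c item => (PySem.Set.ofList (f item)).foldl
        (fun c t => PySem.Dict.modify c t 0 (· + 1)) c) PySem.Dict.empty) t 0
      = (h.map (fun item => ((PySem.Set.ofList (f item)).count t : Int))).sum := by
    intro t
    rw [getD_tally, List.count_flatMap]
    simp [Function.comp_def]
  simp only [hrw]
  rw [sum_swap_int (fun t item => ((PySem.Set.ofList (f item)).count t : Int))]
  refine congrArg List.sum (List.map_congr_left ?_)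
  intro item _
  simp only [count_ofList_indicator]
  exact PySem.List.sum_map_ite_one_zero _ _

-- one category of A's loop sum equals B's score of that category's tally
lemma category_eq (f : α → List String) (E : List String) (h : List α) :
    (h.map (fun item => PySem.Set.len (PySem.Set.inter (PySem.Set.ofList E) (f item)))).sum
      = ((PySem.Set.ofList E).map (fun t => PySem.Dict.getD (h.foldl (fun c item => (PySem.Set.ofList (f item)).foldl
          (fun c t => PySem.Dict.modify c t 0 (· + 1)) c) PySem.Dict.empty) t 0)).sum := by
  rw [score_tally]
  refine congrArg List.sum (List.map_congr_left ?_)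
  intro item _
  rw [len_inter_eq_countP]

-- ===== VERDICT (by name: the statement is the Claim_ definition above) =====
theorem history_bonus_py_spec : Claim_equal_history_bonus_py := by
  intro expert recent_history _
  unfold Spec_history_bonus_py history_bonus_py history_bonus_py_alt pvTally pvScore
  by_cases hnil : recent_history = []
  · subst hnil; simp
  · simp only [if_neg hnil]
    congr 1
    -- split A's single accumulator loop into a sum of three per-category sums
    have hsplit : recent_history.foldl (fun bonus item =>
        let tags : List (String × List String) := PySem.Dict.getD ⟨item⟩ "tags" []
        let bonus := bonus + 2 * PySem.Set.len (PySem.Set.inter (PySem.Set.ofList (PySem.Dict.getD ⟨expert⟩ "industryTags" [])) (PySem.Dict.getD ⟨tags⟩ "industries" []))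
        let bonus := bonus + 2 * PySem.Set.len (PySem.Set.inter (PySem.Set.ofList (PySem.Dict.getD ⟨expert⟩ "functionTags" [])) (PySem.Dict.getD ⟨tags⟩ "functions" []))
        bonus + PySem.Set.len (PySem.Set.inter (PySem.Set.ofList ((PySem.Dict.getD ⟨expert⟩ "topicKeywords" []).map PySem.Str.lower)) ((PySem.Dict.getD ⟨tags⟩ "topics" []).map PySem.Str.lower))) 0
      = 0 + (recent_history.map (fun item =>
          2 * PySem.Set.len (PySem.Set.inter (PySem.Set.ofList (PySem.Dict.getD ⟨expert⟩ "industryTags" [])) (PySem.Dict.getD ⟨(PySem.Dict.getD ⟨item⟩ "tags" [] : List (String × List String))⟩ "industries" []))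
          + 2 * PySem.Set.len (PySem.Set.inter (PySem.Set.ofList (PySem.Dict.getD ⟨expert⟩ "functionTags" [])) (PySem.Dict.getD ⟨(PySem.Dict.getD ⟨item⟩ "tags" [] : List (String × List String))⟩ "functions" []))
          + PySem.Set.len (PySem.Set.inter (PySem.Set.ofList ((PySem.Dict.getD ⟨expert⟩ "topicKeywords" []).map PySem.Str.lower)) ((PySem.Dict.getD ⟨(PySem.Dict.getD ⟨item⟩ "tags" [] : List (String × List String))⟩ "topics" []).map PySem.Str.lower)))).sum := by
      rw [← PySem.List.foldl_add]
      apply PySem.List.foldl_congr_mem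
      intro acc x _
      ring
    rw [hsplit]
    rw [PySem.List.sum_map_add_int, PySem.List.sum_map_add_int]
    rw [List.sum_map_mul_left, List.sum_map_mul_left]
    rw [category_eq (fun item => PySem.Dict.getD ⟨(PySem.Dict.getD ⟨item⟩ "tags" [] : List (String × List String))⟩ "industries" [])]
    rw [category_eq (fun item => PySem.Dict.getD ⟨(PySem.Dict.getD ⟨item⟩ "tags" [] : List (String × List String))⟩ "functions" [])]
    rw [category_eq (fun item => (PySem.Dict.getD ⟨(PySem.Dict.getD ⟨item⟩ "tags" [] : List (String × List String))⟩ "topics" []).map PySem.Str.lower)]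
    simp
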